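-- pv_equiv track=rewrite | github.com/jangg7725-a11y/unteim_root | engine/vocation_recommender.py | _score_tg
-- ===== SOURCE A (Python) =====
-- from typing import Dict, List, Tuple
--
-- def _score_tg(ten: Dict[str, int], tg_list: List[str]) -> int:
--     s = 0
--     for t in tg_list:
--         v = ten.get(t, 0)
--         if v >= 2:   s += 2
--         elif v == 1: s += 1
--         elif v <= -2: s -= 2
--         elif v == -1: s -= 1
--     return s
-- ===== SOURCE B (Python) =====
-- def _score_tg(ten, tg_list):
--     # Count occurrences first, then one pass over the DISTINCT keys:
--     # each distinct key contributes clamp(ten.get(t,0), -2, 2) times its multiplicity.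
--     cnt = {}
--     for t in tg_list:
--         cnt[t] = cnt.get(t, 0) + 1
--     total = 0
--     for t, n in cnt.items():
--         total += max(-2, min(2, ten.get(t, 0))) * n
--     return total
-- ===== Notes on version B (the rewrite author's own statement) =====
-- stated objective: alternative
-- what changed: B first builds a frequency table of tg_list and then makes a single pass over the distinct keys, adding the clamped tenant value times the key's multiplicity, instead of re-looking-up and re-branching for every list element.
import Mathlib
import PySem

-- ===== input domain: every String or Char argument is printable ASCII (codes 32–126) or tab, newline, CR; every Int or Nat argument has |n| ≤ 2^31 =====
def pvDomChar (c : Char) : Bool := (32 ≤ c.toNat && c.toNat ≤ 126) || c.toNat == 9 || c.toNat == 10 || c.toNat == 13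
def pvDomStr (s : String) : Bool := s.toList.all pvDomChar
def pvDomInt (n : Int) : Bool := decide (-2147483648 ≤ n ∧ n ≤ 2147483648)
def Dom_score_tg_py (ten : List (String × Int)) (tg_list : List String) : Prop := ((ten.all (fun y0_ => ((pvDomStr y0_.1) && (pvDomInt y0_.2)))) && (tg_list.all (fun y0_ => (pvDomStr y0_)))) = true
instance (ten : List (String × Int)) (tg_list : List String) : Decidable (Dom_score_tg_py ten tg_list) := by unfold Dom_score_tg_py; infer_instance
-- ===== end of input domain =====

-- B counts tg_list once and sums clamped tenant values per DISTINCT key, weighted by multiplicity (alternative decomposition, same result).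


-- ===== PORT A =====
def score_tg_py (ten : List (String × Int)) (tg_list : List String) : Int :=
  tg_list.foldl (fun s t =>
    let v := (PySem.Dict.mk ten).getD t 0
    if v ≥ 2 then s + 2
    else if v = 1 then s + 1
    else if v ≤ -2 then s - 2
    else if v = -1 then s - 1
    else s) 0

-- ===== PORT B =====
def score_tg_py_alt (ten : List (String × Int)) (tg_list : List String) : Int :=
  let cnt := tg_list.foldl (fun d t => d.insert t (d.getD t 0 + 1)) PySem.Dict.empty
  cnt.items.foldl (fun total p =>
    total + max (-2) (min 2 ((PySem.Dict.mk ten).getD p.1 0)) * p.2) 0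

-- ===== PRECONDITION & SPEC =====
def Spec_score_tg_py (ten : List (String × Int)) (tg_list : List String) (out : Int) : Prop := out = score_tg_py_alt ten tg_list
instance (ten : List (String × Int)) (tg_list : List String) (out : Int) : Decidable (Spec_score_tg_py ten tg_list out) := by unfold Spec_score_tg_py; infer_instance

-- ===== CLAIM (what is proved, stated in full; the proofs are below) =====
def Claim_equal_score_tg_py : Prop := ∀ (ten : List (String × Int)) (tg_list : List String), Dom_score_tg_py ten tg_list → Spec_score_tg_py ten tg_list (score_tg_py ten tg_list)

-- ===== LEMMAS AND PROOFS =====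

-- weighted sum of a counter's items
def pvSumI (f : String → Int) (d : PySem.Dict String Int) : Int :=
  (d.items.map (fun p => f p.1 * p.2)).sum

-- replacing the unique (x, v) entry by (x, v+1) adds f x to the weighted sum
theorem pvSum_replace (f : String → Int) (ps : List (String × Int)) (x : String) (v : Int)
    (hnd : (ps.map Prod.fst).Nodup) (hmem : (x, v) ∈ ps) :
    ((ps.map (fun p => if p.1 == x then (x, v + 1) else p)).map (fun p => f p.1 * p.2)).sum
      = (ps.map (fun p => f p.1 * p.2)).sum + f x := by
  induction ps with
  | nil => simp at hmem
  | cons q rest ih =>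
    simp only [List.map_cons, List.nodup_cons] at hnd
    rcases List.mem_cons.mp hmem with h | h
    · subst h
      simp only [List.map_cons, beq_self_eq_true, List.sum_cons]
      have hall : ∀ p ∈ rest, (if (p.1 == x) = true then (x, v + 1) else p) = p := by
        intro p hp
        have : p.1 ≠ x := by
          intro he
          apply hnd.1
          rw [← he]
          exact List.mem_map.mpr ⟨p, hp, rfl⟩
        simp [this]
      rw [List.map_congr_left hall]
      simp
      ring
    · have hq : q.1 ≠ x := by
        intro he
        exact hnd.1 (he ▸ List.mem_map_of_mem h)
      have hq' : (q.1 == x) = false := by simpa using hq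
      simp only [List.map_cons, List.sum_cons, hq', Bool.false_eq_true, if_false]
      rw [ih hnd.2 h]
      ring

-- one counting-insert step adds f x to the weighted sum
theorem pvSum_step (f : String → Int) (d : PySem.Dict String Int) (x : String)
    (hnd : d.keys.Nodup) :
    pvSumI f (d.insert x (d.getD x 0 + 1)) = pvSumI f d + f x := by
  unfold pvSumI
  by_cases hc : d.contains x = true
  · rw [PySem.Dict.items_insert, if_pos hc]
    have hget : d.get? x = some (d.getD x 0) := by
      rw [PySem.Dict.getD_eq_get?_getD]
      rcases ho : d.get? x with _ | w
      · rw [PySem.Dict.contains_eq_isSome_get?, ho] at hc; simp at hc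
      · simp
    have hmem : (x, d.getD x 0) ∈ d.items := PySem.Dict.mem_items_of_get?_eq_some _ hget
    exact pvSum_replace f d.items x (d.getD x 0) hnd hmem
  · rw [PySem.Dict.items_insert, if_neg hc,
      PySem.Dict.getD_of_not_contains _ _ (by simpa using hc)]
    simp
-- the whole counting loop adds the plain per-element sum
theorem pvSum_loop (f : String → Int) (l : List String) :
    ∀ d : PySem.Dict String Int, d.keys.Nodup →
    pvSumI f (l.foldl (fun d t => d.insert t (d.getD t 0 + 1)) d) = pvSumI f d + (l.map f).sum := by
  induction l with
  | nil => intro d _; simp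
  | cons x t ih =>
    intro d hnd
    simp only [List.foldl_cons, List.map_cons, List.sum_cons]
    rw [ih _ (PySem.Dict.nodup_keys_insert _ _ _ hnd), pvSum_step f d x hnd]
    ring

-- A's branch chain is the clamp to [-2, 2]
theorem pvBranch_eq_clamp (s v : Int) :
    (if v ≥ 2 then s + 2 else if v = 1 then s + 1 else if v ≤ -2 then s - 2
     else if v = -1 then s - 1 else s) = s + max (-2) (min 2 v) := by
  split_ifs <;> omega

-- ===== VERDICT (by name: the statement is the Claim_ definition above) =====
theorem score_tg_py_spec : Claim_equal_score_tg_py := by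
  intro ten tg_list _
  unfold Spec_score_tg_py score_tg_py score_tg_py_alt
  set f : String → Int := fun t => max (-2) (min 2 ((PySem.Dict.mk ten).getD t 0)) with hf
  have hA : tg_list.foldl (fun s t =>
      let v := (PySem.Dict.mk ten).getD t 0
      if v ≥ 2 then s + 2 else if v = 1 then s + 1 else if v ≤ -2 then s - 2
      else if v = -1 then s - 1 else s) 0
      = tg_list.foldl (fun s t => s + f t) 0 := by
    apply PySem.List.foldl_congr_mem
    intro s t _
    exact pvBranch_eq_clamp s _
  rw [hA, PySem.List.foldl_add, PySem.List.foldl_add]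
  have hnodup : (PySem.Dict.empty : PySem.Dict String Int).keys.Nodup := PySem.Dict.nodup_keys_empty
  have h0 := pvSum_loop f tg_list PySem.Dict.empty (by simpa [PySem.Dict.keys] using hnodup)
  simp only [pvSumI, hf] at h0
  simpa [PySem.Dict.empty] using h0.symm
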